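-- pv_equiv track=rewrite | github.com/DHBW-TINF24F/Team4-Semantic-Wikibase | PROJECT/API/Wikibase_API/api_v3/qudt_service.py | to_qname
-- ===== SOURCE A (Python) =====
-- TYPE_CONFIG = {
--     "unit": {
--         "classUri": "http://qudt.org/schema/qudt/Unit",
--         "vocabPrefix": "http://qudt.org/vocab/unit/",
--         "short": "qudt:Unit"
--     },
--     "quantitykind": {
--         "classUri": "http://qudt.org/schema/qudt/QuantityKind",
--         "vocabPrefix": "http://qudt.org/vocab/quantitykind/",
--         "short": "qudt:QuantityKind"
--     },
--     "dimensionvector": {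
--         "classUri": "http://qudt.org/schema/qudt/QuantityKindDimensionVector",
--         "vocabPrefix": "http://qudt.org/vocab/dimensionvector/",
--         "short": "qudt:QuantityKindDimensionVector"
--     },
--     "constant": {
--         "classUri": "http://qudt.org/schema/qudt/PhysicalConstant",
--         "vocabPrefix": "http://qudt.org/vocab/constant/",
--         "short": "qudt:PhysicalConstant"
--     },
--     "sou": {
--         "classUri": "http://qudt.org/schema/qudt/SystemOfUnits",
--         "vocabPrefix": "http://qudt.org/vocab/sou/",
--         "short": "qudt:SystemOfUnits"
--     },
--     "soqk": {
--         "classUri": "http://qudt.org/schema/qudt/SystemOfQuantityKinds",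
--         "vocabPrefix": "http://qudt.org/vocab/soqk/",
--         "short": "qudt:SystemOfQuantityKinds"
--     }
-- }
--
-- def to_qname(uri: str) -> str:
--     for key, cfg in TYPE_CONFIG.items():
--         if uri.startswith(cfg["vocabPrefix"]):
--             local = uri[len(cfg["vocabPrefix"]):]
--             if key == "dimensionvector":
--                 return f"qkdv:{local}"
--             return f"{key}:{local}"
--     return uri
-- ===== SOURCE B (Python) =====
-- _BASE = "http://qudt.org/vocab/"
-- _PREFIX_BY_SEGMENT = {
--     "unit": "unit",
--     "quantitykind": "quantitykind",
--     "dimensionvector": "qkdv",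
--     "constant": "constant",
--     "sou": "sou",
--     "soqk": "soqk",
-- }
--
--
-- def to_qname(uri: str) -> str:
--     if not uri.startswith(_BASE):
--         return uri
--     rest = uri[len(_BASE):]
--     slash = rest.find("/")
--     if slash < 0:
--         return uri
--     prefix = _PREFIX_BY_SEGMENT.get(rest[:slash])
--     if prefix is None:
--         return uri
--     return f"{prefix}:{rest[slash + 1:]}"
-- ===== Notes on version B (the rewrite author's own statement) =====
-- stated objective: alternative
-- what changed: B parses the URI structure once (strip the shared vocab base, split at the first '/') and does a single dict lookup on the segment, instead of A's linear scan testing startswith against all six vocabPrefixes and re-slicing per match.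
import Mathlib
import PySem

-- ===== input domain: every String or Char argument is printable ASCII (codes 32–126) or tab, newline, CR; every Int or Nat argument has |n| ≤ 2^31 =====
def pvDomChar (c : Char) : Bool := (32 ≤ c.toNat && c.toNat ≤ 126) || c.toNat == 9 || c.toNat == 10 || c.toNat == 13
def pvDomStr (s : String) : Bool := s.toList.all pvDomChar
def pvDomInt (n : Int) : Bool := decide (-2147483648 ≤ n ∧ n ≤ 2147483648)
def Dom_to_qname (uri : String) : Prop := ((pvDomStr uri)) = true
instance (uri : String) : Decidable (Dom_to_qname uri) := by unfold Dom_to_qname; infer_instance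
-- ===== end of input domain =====

-- B parses the URI once (strip the shared vocab base, split at the first '/', one table
-- lookup on the segment) instead of A's scan over six startswith tests; same return value.

-- ===== PORT A =====
-- f"{a}:{b}" built on code-point lists (exact; Lean's String.append is kernel-opaque)
def pvFmtColon (a b : String) : String := String.ofList (a.toList ++ ':' :: b.toList)

def TYPE_CONFIG : PySem.Dict String (PySem.Dict String String) :=
  PySem.Dict.ofList
    [ ("unit", PySem.Dict.ofList
        [("classUri", "http://qudt.org/schema/qudt/Unit"),
         ("vocabPrefix", "http://qudt.org/vocab/unit/"),
         ("short", "qudt:Unit")]),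
      ("quantitykind", PySem.Dict.ofList
        [("classUri", "http://qudt.org/schema/qudt/QuantityKind"),
         ("vocabPrefix", "http://qudt.org/vocab/quantitykind/"),
         ("short", "qudt:QuantityKind")]),
      ("dimensionvector", PySem.Dict.ofList
        [("classUri", "http://qudt.org/schema/qudt/QuantityKindDimensionVector"),
         ("vocabPrefix", "http://qudt.org/vocab/dimensionvector/"),
         ("short", "qudt:QuantityKindDimensionVector")]),
      ("constant", PySem.Dict.ofList
        [("classUri", "http://qudt.org/schema/qudt/PhysicalConstant"),
         ("vocabPrefix", "http://qudt.org/vocab/constant/"),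
         ("short", "qudt:PhysicalConstant")]),
      ("sou", PySem.Dict.ofList
        [("classUri", "http://qudt.org/schema/qudt/SystemOfUnits"),
         ("vocabPrefix", "http://qudt.org/vocab/sou/"),
         ("short", "qudt:SystemOfUnits")]),
      ("soqk", PySem.Dict.ofList
        [("classUri", "http://qudt.org/schema/qudt/SystemOfQuantityKinds"),
         ("vocabPrefix", "http://qudt.org/vocab/soqk/"),
         ("short", "qudt:SystemOfQuantityKinds")]) ]

-- A's for-loop over TYPE_CONFIG.items() with early return; cfg["vocabPrefix"] is always present
def to_qname_go (uri : String) : List (String × PySem.Dict String String) → String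
  | [] => uri
  | (key, cfg) :: restCfgs =>
    let vp := (PySem.Dict.get? cfg "vocabPrefix").getD ""
    if PySem.Str.startswith uri vp then
      let loc := PySem.Str.slice uri (some (PySem.Str.len vp)) none
      if key == "dimensionvector" then pvFmtColon "qkdv" loc
      else pvFmtColon key loc
    else to_qname_go uri restCfgs

def to_qname (uri : String) : String := to_qname_go uri (PySem.Dict.items TYPE_CONFIG)

-- ===== PORT B =====
def pvBase : String := "http://qudt.org/vocab/"

def pvPrefixBySegment : PySem.Dict String String :=
  PySem.Dict.ofList
    [("unit", "unit"), ("quantitykind", "quantitykind"), ("dimensionvector", "qkdv"),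
     ("constant", "constant"), ("sou", "sou"), ("soqk", "soqk")]

def to_qname_alt (uri : String) : String :=
  if ! PySem.Str.startswith uri pvBase then uri
  else
    let rest := PySem.Str.slice uri (some (PySem.Str.len pvBase)) none
    let slash := PySem.Str.find rest "/"
    if slash < 0 then uri
    else
      match PySem.Dict.get? pvPrefixBySegment (PySem.Str.slice rest none (some slash)) with
      | none => uri
      | some p => pvFmtColon p (PySem.Str.slice rest (some (slash + 1)) none)

-- ===== PRECONDITION & SPEC =====
def Spec_to_qname (uri : String) (out : String) : Prop := out = to_qname_alt uri
instance (uri : String) (out : String) : Decidable (Spec_to_qname uri out) := by unfold Spec_to_qname; infer_instance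

-- ===== CLAIM (what is proved, stated in full; the proofs are below) =====
def Claim_equal_to_qname : Prop := ∀ (uri : String), Dom_to_qname uri → Spec_to_qname uri (to_qname uri)

-- ===== LEMMAS AND PROOFS =====

-- A unfolds (definitionally) to six literal startswith tests
theorem pvA_char (uri : String) : to_qname uri =
    (if PySem.Str.startswith uri "http://qudt.org/vocab/unit/" then
      pvFmtColon "unit" (PySem.Str.slice uri (some 27) none)
    else if PySem.Str.startswith uri "http://qudt.org/vocab/quantitykind/" then
      pvFmtColon "quantitykind" (PySem.Str.slice uri (some 35) none)
    else if PySem.Str.startswith uri "http://qudt.org/vocab/dimensionvector/" then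
      pvFmtColon "qkdv" (PySem.Str.slice uri (some 38) none)
    else if PySem.Str.startswith uri "http://qudt.org/vocab/constant/" then
      pvFmtColon "constant" (PySem.Str.slice uri (some 31) none)
    else if PySem.Str.startswith uri "http://qudt.org/vocab/sou/" then
      pvFmtColon "sou" (PySem.Str.slice uri (some 26) none)
    else if PySem.Str.startswith uri "http://qudt.org/vocab/soqk/" then
      pvFmtColon "soqk" (PySem.Str.slice uri (some 27) none)
    else uri) := rfl

theorem pvStartswith_iff (uri p : String) :
    PySem.Str.startswith uri p = true ↔ p.toList <+: uri.toList := by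
  rw [PySem.Str.startswith_eq]; exact PySem.Chars.startswith_iff _ _

theorem pvSliceDrop (uri : String) (n : Nat) :
    PySem.Str.slice uri (some (n : Int)) none = String.ofList (uri.toList.drop n) := by
  unfold PySem.Str.slice
  rw [PySem.Chars.slice_eq_listSlice, PySem.List.slice_from _ (by positivity), Int.toNat_natCast]

theorem pvSliceTake (uri : String) (n : Nat) :
    PySem.Str.slice uri none (some (n : Int)) = String.ofList (uri.toList.take n) := by
  unfold PySem.Str.slice
  rw [PySem.Chars.slice_eq_listSlice, PySem.List.slice_to _ (by positivity), Int.toNat_natCast]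

-- a prefix of the form a++c::u matched against b++c::v with c in neither a nor b forces a = b
theorem pvSegPrefix {c : Char} :
    ∀ (a b u v : List Char), c ∉ a → c ∉ b →
      (a ++ c :: u <+: b ++ c :: v ↔ a = b ∧ u <+: v)
  | [], [], u, v, _, _ => by simp [List.cons_prefix_cons]
  | [], d :: b', u, v, _, hb => by
    simp only [List.nil_append, List.cons_append, List.cons_prefix_cons]
    constructor
    · rintro ⟨rfl, -⟩; exact (hb List.mem_cons_self).elim
    · rintro ⟨h, -⟩; exact absurd h.symm (by simp)
  | e :: a', b, u, v, ha, hb => by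
    cases b with
    | nil =>
      simp only [List.cons_append, List.nil_append, List.cons_prefix_cons]
      constructor
      · rintro ⟨rfl, -⟩; exact (ha List.mem_cons_self).elim
      · rintro ⟨h, -⟩; simp at h
    | cons d b' =>
      simp only [List.cons_append, List.cons_prefix_cons]
      rw [pvSegPrefix a' b' u v (fun h => ha (List.mem_cons_of_mem _ h))
            (fun h => hb (List.mem_cons_of_mem _ h))]
      constructor
      · rintro ⟨rfl, rfl, h⟩; exact ⟨rfl, h⟩
      · rintro ⟨h, hu⟩; cases h; exact ⟨rfl, rfl, hu⟩

-- find points at the first separator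
theorem pvFindSep (s t : List Char) (hs : '/' ∉ s) :
    PySem.Chars.find (s ++ '/' :: t) ['/'] = (s.length : Int) := by
  have hinf : ['/'] <:+: s ++ '/' :: t := ⟨s, t, by simp⟩
  have h0 : 0 ≤ PySem.Chars.find (s ++ '/' :: t) ['/'] :=
    (PySem.Chars.find_nonneg_iff _ _).2 hinf
  obtain ⟨hpre, hmin⟩ := PySem.Chars.find_spec h0
  set k := (PySem.Chars.find (s ++ '/' :: t) ['/']).toNat with hk
  rcases lt_trichotomy k s.length with hlt | heq | hgt
  · exfalso
    rw [List.drop_append_of_le_length (le_of_lt hlt),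
        List.drop_eq_getElem_cons hlt] at hpre
    rw [List.cons_append, List.cons_prefix_cons] at hpre
    exact hs (hpre.1 ▸ List.getElem_mem hlt)
  · omega
  · exfalso
    apply hmin s.length hgt
    rw [List.drop_left]
    exact ⟨t, rfl⟩

-- first-slash decomposition
theorem pvFirstSlash : ∀ (r : List Char), '/' ∈ r →
    ∃ s t, r = s ++ '/' :: t ∧ '/' ∉ s
  | [], h => absurd h List.not_mem_nil
  | c :: r', h => by
    by_cases hc : c = '/'
    · exact ⟨[], r', by simp [hc], by simp⟩
    · have hmem : '/' ∈ r' := by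
        rcases List.mem_cons.1 h with h1 | h1
        · exact absurd h1.symm hc
        · exact h1
      obtain ⟨s, t, rfl, hsn⟩ := pvFirstSlash r' hmem
      refine ⟨c :: s, t, rfl, ?_⟩
      simp only [List.mem_cons, not_or]
      exact ⟨fun h => hc h.symm, hsn⟩

theorem pvOfListEq {s : List Char} {x : String} (h : String.ofList s = x) : s = x.toList := by
  rw [← h, String.toList_ofList]

-- main equivalence
theorem pvMain (uri : String) : to_qname uri = to_qname_alt uri := by
  rw [pvA_char]
  by_cases hb : pvBase.toList <+: uri.toList
  case neg =>
    have hfalse : ∀ p : String, pvBase.toList <+: p.toList →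
        PySem.Str.startswith uri p = false := fun p hp =>
      Bool.eq_false_iff.mpr fun h => hb (hp.trans ((pvStartswith_iff uri p).1 h))
    rw [hfalse _ (by decide), hfalse _ (by decide), hfalse _ (by decide),
        hfalse _ (by decide), hfalse _ (by decide), hfalse _ (by decide)]
    have hb0 : PySem.Str.startswith uri pvBase = false :=
      Bool.eq_false_iff.mpr fun h => hb ((pvStartswith_iff uri pvBase).1 h)
    have hBeq : to_qname_alt uri = uri := by
      simp only [to_qname_alt, hb0, Bool.not_false]
      all_goals simp only [if_true]
    rw [hBeq]
    simp only [Bool.false_eq_true, if_false]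
  case pos =>
    obtain ⟨r, hr⟩ := hb
    have hb0 : PySem.Str.startswith uri pvBase = true :=
      (pvStartswith_iff uri pvBase).2 ⟨r, hr⟩
    have hlen : PySem.Str.len pvBase = (22 : Int) := rfl
    have hrest : PySem.Str.slice uri (some (PySem.Str.len pvBase)) none = String.ofList r := by
      rw [hlen, show ((22 : Int)) = ((22 : Nat) : Int) from rfl, pvSliceDrop]
      congr 1
      rw [← hr, List.drop_left' (by decide)]
    have hcond : ∀ (p seg : String), p.toList = pvBase.toList ++ seg.toList ++ ['/'] →
        (PySem.Str.startswith uri p = true ↔ seg.toList ++ '/' :: [] <+: r) := by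
      intro p seg hp
      rw [pvStartswith_iff, hp, ← hr, List.append_assoc, List.prefix_append_right_inj]
    by_cases hmem : '/' ∈ r
    case neg =>
      have hnos : ∀ (p seg : String), p.toList = pvBase.toList ++ seg.toList ++ ['/'] →
          PySem.Str.startswith uri p = false := by
        intro p seg hp
        refine Bool.eq_false_iff.mpr fun h => hmem ?_
        exact ((hcond p seg hp).1 h).sublist.subset (by simp)
      rw [hnos _ "unit" (by decide), hnos _ "quantitykind" (by decide),
          hnos _ "dimensionvector" (by decide), hnos _ "constant" (by decide),
          hnos _ "sou" (by decide), hnos _ "soqk" (by decide)]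
      have hfind : PySem.Str.find (String.ofList r) "/" = -1 := by
        rw [PySem.Str.find_eq, String.toList_ofList]
        exact (PySem.Chars.find_eq_neg_one_iff _ _).2
          (fun hinf => hmem (hinf.sublist.subset (by simp)))
      have hBeq : to_qname_alt uri = uri := by
        simp only [to_qname_alt, hb0, Bool.not_true, Bool.false_eq_true, if_false, hrest, hfind]
        all_goals rw [if_pos (show (-1 : Int) < 0 by norm_num)]
      rw [hBeq]
      simp only [Bool.false_eq_true, if_false]
    case pos =>
      obtain ⟨s, t, rfl, hs⟩ := pvFirstSlash r hmem
      have hfind : PySem.Str.find (String.ofList (s ++ '/' :: t)) "/" = (s.length : Int) := by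
        rw [PySem.Str.find_eq, String.toList_ofList]
        exact pvFindSep s t hs
      have hseg : PySem.Str.slice (String.ofList (s ++ '/' :: t)) none (some (s.length : Int))
          = String.ofList s := by
        rw [pvSliceTake, String.toList_ofList]
        congr 1
        exact List.take_left' rfl
      have hloc : PySem.Str.slice (String.ofList (s ++ '/' :: t)) (some ((s.length : Int) + 1)) none
          = String.ofList t := by
        rw [show ((s.length : Int) + 1) = ((s.length + 1 : Nat) : Int) by push_cast; ring,
            pvSliceDrop, String.toList_ofList]
        congr 1
        rw [show s ++ '/' :: t = (s ++ ['/']) ++ t by simp, List.drop_left' (by simp)]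
      have hbl : pvBase.toList.length = 22 := by decide
      have hAslice : ∀ (n : Nat) (seg : String), s = seg.toList → n = 22 + s.length + 1 →
          PySem.Str.slice uri (some (n : Int)) none = String.ofList t := by
        intro n _ _ hn
        rw [pvSliceDrop]
        congr 1
        rw [← hr,
            show pvBase.toList ++ (s ++ '/' :: t) = (pvBase.toList ++ s ++ ['/']) ++ t by simp,
            List.drop_left' (by
              simp only [List.length_append, List.length_cons, List.length_nil, hbl, hn])]
      have hcond' : ∀ (p seg : String), p.toList = pvBase.toList ++ seg.toList ++ ['/'] →
          '/' ∉ seg.toList →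
          (PySem.Str.startswith uri p = true ↔ seg.toList = s) := by
        intro p seg hp hsl
        rw [hcond p seg hp, pvSegPrefix _ _ _ _ hsl hs]
        simp
      have hB : to_qname_alt uri =
          (match PySem.Dict.get? pvPrefixBySegment (String.ofList s) with
           | none => uri
           | some p => pvFmtColon p (String.ofList t)) := by
        simp only [to_qname_alt, hb0, Bool.not_true, Bool.false_eq_true, if_false,
          hrest, hfind, hseg, hloc]
        all_goals rw [if_neg (by omega : ¬ ((s.length : Int) < 0))]
      have hitems : pvPrefixBySegment.items =
          [("unit", "unit"), ("quantitykind", "quantitykind"), ("dimensionvector", "qkdv"),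
           ("constant", "constant"), ("sou", "sou"), ("soqk", "soqk")] := by decide
      by_cases h1 : s = "unit".toList
      · rw [(hcond' _ "unit" (by decide) (by decide)).2 h1.symm, if_pos rfl,
            show (27 : Int) = ((27 : Nat) : Int) from rfl, hAslice 27 "unit" h1 (by rw [h1]; decide), hB, h1, String.ofList_toList,
            show PySem.Dict.get? pvPrefixBySegment "unit" = some "unit" from by decide]
      · rw [Bool.eq_false_iff.mpr
              (fun h => h1 (((hcond' _ "unit" (by decide) (by decide)).1 h).symm)),
            if_neg Bool.false_ne_true]
        by_cases h2 : s = "quantitykind".toList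
        · rw [(hcond' _ "quantitykind" (by decide) (by decide)).2 h2.symm, if_pos rfl,
              show (35 : Int) = ((35 : Nat) : Int) from rfl, hAslice 35 "quantitykind" h2 (by rw [h2]; decide), hB, h2, String.ofList_toList,
              show PySem.Dict.get? pvPrefixBySegment "quantitykind" = some "quantitykind" from
                by decide]
        · rw [Bool.eq_false_iff.mpr
                (fun h => h2 (((hcond' _ "quantitykind" (by decide) (by decide)).1 h).symm)),
              if_neg Bool.false_ne_true]
          by_cases h3 : s = "dimensionvector".toList
          · rw [(hcond' _ "dimensionvector" (by decide) (by decide)).2 h3.symm, if_pos rfl,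
                show (38 : Int) = ((38 : Nat) : Int) from rfl, hAslice 38 "dimensionvector" h3 (by rw [h3]; decide), hB, h3,
                String.ofList_toList,
                show PySem.Dict.get? pvPrefixBySegment "dimensionvector" = some "qkdv" from
                  by decide]
          · rw [Bool.eq_false_iff.mpr
                  (fun h => h3 (((hcond' _ "dimensionvector" (by decide) (by decide)).1 h).symm)),
                if_neg Bool.false_ne_true]
            by_cases h4 : s = "constant".toList
            · rw [(hcond' _ "constant" (by decide) (by decide)).2 h4.symm, if_pos rfl,
                  show (31 : Int) = ((31 : Nat) : Int) from rfl, hAslice 31 "constant" h4 (by rw [h4]; decide), hB, h4, String.ofList_toList,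
                  show PySem.Dict.get? pvPrefixBySegment "constant" = some "constant" from
                    by decide]
            · rw [Bool.eq_false_iff.mpr
                    (fun h => h4 (((hcond' _ "constant" (by decide) (by decide)).1 h).symm)),
                  if_neg Bool.false_ne_true]
              by_cases h5 : s = "sou".toList
              · rw [(hcond' _ "sou" (by decide) (by decide)).2 h5.symm, if_pos rfl,
                    show (26 : Int) = ((26 : Nat) : Int) from rfl, hAslice 26 "sou" h5 (by rw [h5]; decide), hB, h5, String.ofList_toList,
                    show PySem.Dict.get? pvPrefixBySegment "sou" = some "sou" from by decide]
              · rw [Bool.eq_false_iff.mpr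
                      (fun h => h5 (((hcond' _ "sou" (by decide) (by decide)).1 h).symm)),
                    if_neg Bool.false_ne_true]
                by_cases h6 : s = "soqk".toList
                · rw [(hcond' _ "soqk" (by decide) (by decide)).2 h6.symm, if_pos rfl,
                      show (27 : Int) = ((27 : Nat) : Int) from rfl, hAslice 27 "soqk" h6 (by rw [h6]; decide), hB, h6, String.ofList_toList,
                      show PySem.Dict.get? pvPrefixBySegment "soqk" = some "soqk" from by decide]
                · rw [Bool.eq_false_iff.mpr
                        (fun h => h6 (((hcond' _ "soqk" (by decide) (by decide)).1 h).symm)),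
                      if_neg Bool.false_ne_true]
                  have hne : ∀ (k : String), ¬ s = k.toList →
                      ((k == String.ofList s)) = false := fun k hk =>
                    beq_eq_false_iff_ne.mpr (fun h => hk (pvOfListEq h.symm))
                  have hnone : PySem.Dict.get? pvPrefixBySegment (String.ofList s) = none := by
                    simp [PySem.Dict.get?, hitems, hne "unit" h1, hne "quantitykind" h2,
                      hne "dimensionvector" h3, hne "constant" h4, hne "sou" h5, hne "soqk" h6]
                  rw [hB, hnone]

-- ===== VERDICT (by name: the statement is the Claim_ definition above) =====
theorem to_qname_spec : Claim_equal_to_qname := by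
  intro uri _
  unfold Spec_to_qname
  exact pvMain uri
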